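-- pv_equiv track=rewrite | github.com/Phoenix-rgbb/eh | backend/utils.py | prioritize_queue
-- ===== SOURCE A (Python) =====
-- def prioritize_queue(symptoms: str, patient_age: int = None, medical_history: str = None):
--     """Simple rule-based priority calculation"""
--     priority = 1  # default low priority
--
--     emergency_keywords = ["chest pain", "difficulty breathing", "severe bleeding",
--                          "unconscious", "heart attack", "stroke", "seizure"]
--     high_priority_keywords = ["fever", "vomiting", "severe pain", "infection"]
--
--     symptoms_lower = symptoms.lower()
--
--     for keyword in emergency_keywords:
--         if keyword in symptoms_lower:
--             return 4  # emergency
--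
--     for keyword in high_priority_keywords:
--         if keyword in symptoms_lower:
--             priority = max(priority, 3)  # high priority
--
--     # Age-based priority adjustment
--     if patient_age and (patient_age > 65 or patient_age < 5):
--         priority = max(priority, 2)  # medium priority for elderly and children
--
--     return priority
-- ===== SOURCE B (Python) =====
-- # Single left-to-right positional scan of the text using a first-character index
-- # of one unified (keyword, level) table, instead of per-category membership passes.
-- RULES = [("chest pain", 4), ("difficulty breathing", 4), ("severe bleeding", 4),
--          ("unconscious", 4), ("heart attack", 4), ("stroke", 4), ("seizure", 4),
--          ("fever", 3), ("vomiting", 3), ("severe pain", 3), ("infection", 3)]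
--
-- BY_FIRST = {}
-- for kw, lvl in RULES:
--     BY_FIRST[kw[0]] = BY_FIRST.get(kw[0], []) + [(kw, lvl)]
--
--
-- def prioritize_queue(symptoms: str, patient_age: int = None, medical_history: str = None):
--     """Rule-based priority via one positional scan with a first-char keyword index."""
--     s = symptoms.lower()
--     best = 1
--     for i, ch in enumerate(s):
--         for kw, lvl in BY_FIRST.get(ch, []):
--             if lvl > best and s.startswith(kw, i):
--                 best = lvl
--     if patient_age and (patient_age > 65 or patient_age < 5):
--         best = max(best, 2)
--     return best
-- ===== Notes on version B (the rewrite author's own statement) =====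
-- stated objective: alternative
-- what changed: Replaced A's staged per-category substring membership passes (with an early return) by a single left-to-right positional scan of the lowered text that consults a first-character index of one unified (keyword, level) table and keeps the best level seen; the age adjustment folds in afterwards.
import Mathlib
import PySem

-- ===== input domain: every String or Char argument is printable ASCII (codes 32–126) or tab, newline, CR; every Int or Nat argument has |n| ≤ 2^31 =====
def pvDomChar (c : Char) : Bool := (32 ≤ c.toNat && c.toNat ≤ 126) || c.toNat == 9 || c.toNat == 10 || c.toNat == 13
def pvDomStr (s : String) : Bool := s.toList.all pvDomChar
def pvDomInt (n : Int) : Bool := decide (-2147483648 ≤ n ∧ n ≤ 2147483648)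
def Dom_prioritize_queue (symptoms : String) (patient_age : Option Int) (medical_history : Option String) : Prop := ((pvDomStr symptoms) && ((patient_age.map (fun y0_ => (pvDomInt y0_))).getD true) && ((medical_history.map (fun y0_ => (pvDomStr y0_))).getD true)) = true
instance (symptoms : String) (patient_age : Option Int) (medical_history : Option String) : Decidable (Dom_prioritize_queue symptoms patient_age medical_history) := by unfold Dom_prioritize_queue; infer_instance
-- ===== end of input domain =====

-- B replaces A's staged per-category substring-membership passes by one positional
-- left-to-right scan of the lowered text driven by a first-character index of a
-- unified (keyword, level) table (objective: alternative).


-- ===== PORT A =====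
-- Python truthiness of 'patient_age and (patient_age > 65 or patient_age < 5)' (None and 0 are falsy)
def pyAgeBoost (patient_age : Option Int) : Bool :=
  match patient_age with
  | none => false
  | some a => decide (a ≠ 0) && (decide (a > 65) || decide (a < 5))

def prioritize_queue (symptoms : String) (patient_age : Option Int) (medical_history : Option String) : Int :=
  let priority : Int := 1
  let emergency_keywords : List String := ["chest pain", "difficulty breathing", "severe bleeding",
    "unconscious", "heart attack", "stroke", "seizure"]
  let high_priority_keywords : List String := ["fever", "vomiting", "severe pain", "infection"]
  let symptoms_lower := PySem.Str.lower symptoms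
  -- 'for keyword in …: if keyword in …: return 4' = find the first match, return 4 if any
  match emergency_keywords.find? (fun keyword => PySem.Str.isIn keyword symptoms_lower) with
  | some _ => 4
  | none =>
    let priority := high_priority_keywords.foldl
      (fun priority keyword => if PySem.Str.isIn keyword symptoms_lower then max priority 3 else priority)
      priority
    let priority :=
      if pyAgeBoost patient_age then
        max priority 2
      else priority
    priority

-- ===== PORT B =====
-- module-level RULES table of Source B
def pvRules : List (String × Int) :=
  [("chest pain", 4), ("difficulty breathing", 4), ("severe bleeding", 4),
   ("unconscious", 4), ("heart attack", 4), ("stroke", 4), ("seizure", 4),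
   ("fever", 3), ("vomiting", 3), ("severe pain", 3), ("infection", 3)]

-- module-level BY_FIRST index of Source B: BY_FIRST[kw[0]] = BY_FIRST.get(kw[0], []) + [(kw, lvl)];
-- Python's 1-character string keys kw[0] are Chars here
def pvByFirst : PySem.Dict Char (List (String × Int)) :=
  pvRules.foldl (fun d p =>
    d.insert (p.1.toList.headD ' ') (d.getD (p.1.toList.headD ' ') [] ++ [p])) PySem.Dict.empty

def prioritize_queue_alt (symptoms : String) (patient_age : Option Int) (medical_history : Option String) : Int :=
  let s := (PySem.Str.lower symptoms).toList
  -- for i, ch in enumerate(s): for kw, lvl in BY_FIRST.get(ch, []): …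
  let best := (PySem.List.enumerate s).foldl (fun best ic =>
      (pvByFirst.getD ic.2 []).foldl (fun best p =>
        -- s.startswith(kw, i) with 0 ≤ i ≤ len(s): exactly kw.toList <+: s.drop i
        if p.2 > best && p.1.toList.isPrefixOf (s.drop ic.1.toNat) then p.2 else best) best) (1 : Int)
  if pyAgeBoost patient_age then max best 2 else best

-- ===== PRECONDITION & SPEC =====
def Spec_prioritize_queue (symptoms : String) (patient_age : Option Int) (medical_history : Option String) (out : Int) : Prop := out = prioritize_queue_alt symptoms patient_age medical_history
instance (symptoms : String) (patient_age : Option Int) (medical_history : Option String) (out : Int) : Decidable (Spec_prioritize_queue symptoms patient_age medical_history out) := by unfold Spec_prioritize_queue; infer_instance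

-- ===== CLAIM (what is proved, stated in full; the proofs are below) =====
def Claim_equal_prioritize_queue : Prop := ∀ (symptoms : String) (patient_age : Option Int) (medical_history : Option String), Dom_prioritize_queue symptoms patient_age medical_history → Spec_prioritize_queue symptoms patient_age medical_history (prioritize_queue symptoms patient_age medical_history)

-- ===== LEMMAS AND PROOFS =====

-- every bucket of the first-character index holds only table rules
theorem pvBucket_sub (ch : Char) (p : String × Int) (h : p ∈ pvByFirst.getD ch []) : p ∈ pvRules := by
  rw [show pvByFirst = PySem.Dict.mk
    [('c', [("chest pain", 4)]),
     ('d', [("difficulty breathing", 4)]),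
     ('s', [("severe bleeding", 4), ("stroke", 4), ("seizure", 4), ("severe pain", 3)]),
     ('u', [("unconscious", 4)]),
     ('h', [("heart attack", 4)]),
     ('f', [("fever", 3)]),
     ('v', [("vomiting", 3)]),
     ('i', [("infection", 3)])] from rfl] at h
  simp [PySem.Dict.getD_eq_get?_getD, PySem.Dict.get?_mk_cons] at h
  split_ifs at h <;> first
    | (simp_all [pvRules, PySem.Dict.get?]; tauto)
    | simp_all [pvRules, PySem.Dict.get?]

-- every rule sits in the bucket of its first character
theorem pvRule_mem_bucket : ∀ p ∈ pvRules, p ∈ pvByFirst.getD (p.1.toList.headD ' ') [] := by decide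

-- (position, rule) matches: the keyword starts at that position of the text
def pvMatch (s : List Char) (x : Int × (String × Int)) : Bool :=
  x.2.1.toList.isPrefixOf (s.drop x.1.toNat)

-- all (position, rule) pairs the scan inspects, flattened
def pvFL (s : List Char) : List (Int × (String × Int)) :=
  (PySem.List.enumerate s).flatMap (fun ic => (pvByFirst.getD ic.2 []).map (fun p => (ic.1, p)))

-- B's nested scan is a fold of 'if match then max' over the flattened pair list
theorem pvScan_eq_flat (s : List Char) (b : Int) :
    (PySem.List.enumerate s).foldl (fun best ic =>
      (pvByFirst.getD ic.2 []).foldl (fun best p =>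
        if p.2 > best && p.1.toList.isPrefixOf (s.drop ic.1.toNat) then p.2 else best) best) b
    = (pvFL s).foldl (fun best x => if pvMatch s x then max best x.2.2 else best) b := by
  rw [pvFL, List.foldl_flatMap]
  have hfun : (fun (best : Int) (ic : Int × Char) =>
      (pvByFirst.getD ic.2 []).foldl (fun best p =>
        if p.2 > best && p.1.toList.isPrefixOf (s.drop ic.1.toNat) then p.2 else best) best)
    = (fun (best : Int) (ic : Int × Char) =>
      ((pvByFirst.getD ic.2 []).map (fun p => (ic.1, p))).foldl
        (fun best x => if pvMatch s x then max best x.2.2 else best) best) := by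
    funext best ic
    rw [List.foldl_map]
    have hstep : (fun (best : Int) (p : String × Int) =>
        if p.2 > best && p.1.toList.isPrefixOf (s.drop ic.1.toNat) then p.2 else best)
      = (fun (best : Int) (p : String × Int) =>
        if pvMatch s (ic.1, p) then max best p.2 else best) := by
      funext acc p
      by_cases h : p.1.toList.isPrefixOf (s.drop ic.1.toNat) = true
      · simp only [pvMatch, h, Bool.and_true, if_pos]
        by_cases hlt : acc < p.2
        · rw [if_pos (by simp [hlt]), max_eq_right (le_of_lt hlt)]
        · rw [if_neg (by simp; omega), max_eq_left (by omega)]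
      · simp only [Bool.not_eq_true] at h
        simp [pvMatch, h]
    rw [hstep]
  rw [hfun]

-- the 'if match then max' fold over {3,4}-levelled pairs collapses to two any-tests
theorem pvFoldl_if_max34 (P : Int × (String × Int) → Bool) :
    ∀ (L : List (Int × (String × Int))) (b : Int), (∀ x ∈ L, x.2.2 = 3 ∨ x.2.2 = 4) →
    L.foldl (fun b x => if P x then max b x.2.2 else b) b
    = if L.any (fun x => P x && (x.2.2 == 4)) then max b 4
      else if L.any P then max b 3 else b := by
  intro L
  induction L with
  | nil => simp
  | cons a t ih =>
    intro b hlv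
    have ha := hlv a (List.mem_cons_self)
    have ht : ∀ x ∈ t, x.2.2 = 3 ∨ x.2.2 = 4 := fun x hx => hlv x (List.mem_cons_of_mem _ hx)
    simp only [List.foldl_cons, List.any_cons]
    by_cases hp : P a = true
    · rcases ha with h3 | h4
      · rw [if_pos hp, ih (max b a.2.2) ht, h3]
        by_cases h4t : (t.any fun x => P x && (x.2.2 == 4)) = true
        · have e1 : max (max b 3) 4 = max b 4 := by rw [max_assoc]; norm_num
          simp [hp, h4t, e1]
        · by_cases hat : t.any P = true
          · have e2 : max (max b 3) 3 = max b 3 := by rw [max_assoc]; norm_num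
            simp [hp, h4t, hat, e2]
          · simp [hp, h4t, hat]
      · rw [if_pos hp, ih (max b a.2.2) ht, h4]
        have e1 : max (max b 4) 4 = max b 4 := by rw [max_assoc]; norm_num
        have e2 : max (max b 4) 3 = max b 4 := by rw [max_assoc]; norm_num
        simp only [hp, Bool.true_and, e1, e2]
        have h44 : ((4 : Int) == 4) = true := by decide
        rw [h44]
        simp only [Bool.true_or, if_true]
        split_ifs <;> rfl
    · simp only [Bool.not_eq_true] at hp
      rw [if_neg (by simp [hp]), ih b ht]
      simp only [hp, Bool.false_and, Bool.false_or]

-- a Q-rule matches at some scanned position iff some Q-rule keyword occurs in the text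
theorem pvFlatAny_iff (s : List Char) (Q : String × Int → Bool) :
    (pvFL s).any (fun x => pvMatch s x && Q x.2) = true ↔
    ∃ p ∈ pvRules, Q p = true ∧ PySem.Chars.isIn p.1.toList s = true := by
  constructor
  · intro h
    simp only [List.any_eq_true, Bool.and_eq_true] at h
    obtain ⟨x, hx, hP, hQ⟩ := h
    simp only [pvFL, List.mem_flatMap, List.mem_map] at hx
    obtain ⟨ic, _, p, hp, hxe⟩ := hx
    subst hxe
    refine ⟨p, pvBucket_sub ic.2 p hp, hQ, ?_⟩
    rw [← PySem.Chars.exists_prefix_drop_iff_isIn]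
    exact ⟨ic.1.toNat, List.isPrefixOf_iff_prefix.mp hP⟩
  · rintro ⟨p, hp, hQ, hin⟩
    rw [← PySem.Chars.exists_prefix_drop_iff_isIn] at hin
    obtain ⟨j, hj⟩ := hin
    have hne : p.1.toList ≠ [] := by
      have : ∀ q ∈ pvRules, q.1.toList ≠ [] := by decide
      exact this p hp
    have hjlt : j < s.length := by
      by_contra hge
      rw [not_lt] at hge
      rw [List.drop_eq_nil_of_le hge, List.prefix_nil] at hj
      exact hne hj
    have hdrop : s.drop j = s[j] :: s.drop (j + 1) := (List.getElem_cons_drop hjlt).symm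
    obtain ⟨c, t, hct⟩ : ∃ c t, p.1.toList = c :: t := by
      rcases hcl : p.1.toList with _ | ⟨c, t⟩
      · exact absurd hcl hne
      · exact ⟨c, t, rfl⟩
    have hhead : p.1.toList.headD ' ' = s[j] := by
      rw [hct] at hj ⊢
      rw [hdrop] at hj
      exact (List.cons_prefix_cons.mp hj).1
    have hb : p ∈ pvByFirst.getD s[j] [] := by
      rw [← hhead]; exact pvRule_mem_bucket p hp
    refine List.any_eq_true.mpr ⟨((j : Int), p), ?_, ?_⟩
    · simp only [pvFL, List.mem_flatMap, List.mem_map]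
      refine ⟨((j : Int), s[j]), ?_, p, hb, rfl⟩
      rw [PySem.List.mem_enumerate_iff]
      exact ⟨j, hjlt, by simp⟩
    · simp only [Bool.and_eq_true]
      refine ⟨?_, hQ⟩
      simp only [pvMatch, Int.toNat_natCast]
      exact List.isPrefixOf_iff_prefix.mpr hj

-- A's high-priority fold on an arbitrary start ≤ 3 collapses to an if-any
theorem pvFoldl_max3 (l : List String) (P : String → Bool) (p : Int) (hp : p ≤ 3) :
    l.foldl (fun q k => if P k then max q 3 else q) p = if l.any P then 3 else p := by
  induction l generalizing p with
  | nil => simp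
  | cons a t ih =>
    simp only [List.foldl_cons, List.any_cons]
    by_cases h : P a = true
    · rw [if_pos h, max_eq_right hp, ih 3 le_rfl]
      simp [h]
    · simp only [Bool.not_eq_true] at h
      rw [if_neg (by simp [h]), ih p hp]
      simp [h]

set_option maxHeartbeats 1600000 in
theorem prioritize_queue_spec : Claim_equal_prioritize_queue := by
  intro symptoms patient_age medical_history _
  unfold Spec_prioritize_queue prioritize_queue prioritize_queue_alt
  simp only
  set s := (PySem.Str.lower symptoms).toList with hs
  -- levels in the table are 3 or 4
  have hlv : ∀ x ∈ pvFL s, x.2.2 = 3 ∨ x.2.2 = 4 := by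
    intro x hx
    simp only [pvFL, List.mem_flatMap, List.mem_map] at hx
    obtain ⟨ic, _, p, hp, hxe⟩ := hx
    subst hxe
    have hmem := pvBucket_sub ic.2 p hp
    have hall : ∀ q ∈ pvRules, q.2 = 3 ∨ q.2 = 4 := by decide
    exact hall p hmem
  have hscan := (pvScan_eq_flat s 1).trans
    (pvFoldl_if_max34 (fun x => pvMatch s x) (pvFL s) 1 hlv)
  rw [hscan]
  -- a level-4 match somewhere ⟺ an emergency keyword occurs
  have hE4 : (pvFL s).any (fun x => pvMatch s x && (x.2.2 == 4)) = true ↔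
      (∃ kw ∈ (["chest pain", "difficulty breathing", "severe bleeding",
        "unconscious", "heart attack", "stroke", "seizure"] : List String),
        PySem.Chars.isIn kw.toList s = true) := by
    rw [pvFlatAny_iff s (fun p => p.2 == 4)]
    constructor
    · rintro ⟨p, hp, hQ, hin⟩
      simp only [pvRules, List.mem_cons, List.not_mem_nil, or_false] at hp
      rcases hp with h | h | h | h | h | h | h | h | h | h | h <;> subst h <;>
        first
          | exact absurd hQ (by decide)
          | exact ⟨_, by decide, hin⟩
    · rintro ⟨kw, hkw, hin⟩
      simp only [List.mem_cons, List.not_mem_nil, or_false] at hkw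
      rcases hkw with h | h | h | h | h | h | h <;> subst h
      · exact ⟨("chest pain", 4), by decide, by decide, hin⟩
      · exact ⟨("difficulty breathing", 4), by decide, by decide, hin⟩
      · exact ⟨("severe bleeding", 4), by decide, by decide, hin⟩
      · exact ⟨("unconscious", 4), by decide, by decide, hin⟩
      · exact ⟨("heart attack", 4), by decide, by decide, hin⟩
      · exact ⟨("stroke", 4), by decide, by decide, hin⟩
      · exact ⟨("seizure", 4), by decide, by decide, hin⟩
  -- any match somewhere ⟺ some table keyword occurs
  have hEall : (pvFL s).any (fun x => pvMatch s x) = true ↔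
      (∃ p ∈ pvRules, PySem.Chars.isIn p.1.toList s = true) := by
    have h := pvFlatAny_iff s (fun _ => true)
    simpa using h
  rcases hfind : (["chest pain", "difficulty breathing", "severe bleeding",
      "unconscious", "heart attack", "stroke", "seizure"] : List String).find?
      (fun keyword => PySem.Str.isIn keyword (PySem.Str.lower symptoms)) with _ | k
  · -- no emergency keyword occurs
    have hnoE : ∀ kw ∈ (["chest pain", "difficulty breathing", "severe bleeding",
        "unconscious", "heart attack", "stroke", "seizure"] : List String),
        PySem.Chars.isIn kw.toList s = false := by
      intro kw hkw
      have h := List.find?_eq_none.mp hfind kw hkw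
      simp only [Bool.not_eq_true, PySem.Str.isIn_eq, ← hs] at h
      exact h
    have hf4 : (pvFL s).any (fun x => pvMatch s x && (x.2.2 == 4)) = false := by
      cases h : (pvFL s).any (fun x => pvMatch s x && (x.2.2 == 4)) with
      | false => rfl
      | true =>
        obtain ⟨kw, hkw, hin⟩ := hE4.mp h
        rw [hnoE kw hkw] at hin
        exact absurd hin (by simp)
    -- any match left ⟺ a high-priority keyword occurs
    have hH : (pvFL s).any (fun x => pvMatch s x) =
        (["fever", "vomiting", "severe pain", "infection"] : List String).any
          (fun keyword => PySem.Str.isIn keyword (PySem.Str.lower symptoms)) := by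
      rw [Bool.eq_iff_iff, hEall, List.any_eq_true]
      constructor
      · rintro ⟨p, hp, hin⟩
        simp only [pvRules, List.mem_cons, List.not_mem_nil, or_false] at hp
        rcases hp with h | h | h | h | h | h | h | h | h | h | h <;> subst h
        · exact absurd hin (by rw [hnoE "chest pain" (by decide)]; simp)
        · exact absurd hin (by rw [hnoE "difficulty breathing" (by decide)]; simp)
        · exact absurd hin (by rw [hnoE "severe bleeding" (by decide)]; simp)
        · exact absurd hin (by rw [hnoE "unconscious" (by decide)]; simp)
        · exact absurd hin (by rw [hnoE "heart attack" (by decide)]; simp)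
        · exact absurd hin (by rw [hnoE "stroke" (by decide)]; simp)
        · exact absurd hin (by rw [hnoE "seizure" (by decide)]; simp)
        · exact ⟨"fever", by decide, by simp only [PySem.Str.isIn_eq, ← hs]; exact hin⟩
        · exact ⟨"vomiting", by decide, by simp only [PySem.Str.isIn_eq, ← hs]; exact hin⟩
        · exact ⟨"severe pain", by decide, by simp only [PySem.Str.isIn_eq, ← hs]; exact hin⟩
        · exact ⟨"infection", by decide, by simp only [PySem.Str.isIn_eq, ← hs]; exact hin⟩
      · rintro ⟨kw, hkw, hx⟩
        simp only [PySem.Str.isIn_eq, ← hs] at hx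
        simp only [List.mem_cons, List.not_mem_nil, or_false] at hkw
        rcases hkw with h | h | h | h <;> subst h
        · exact ⟨("fever", 3), by decide, hx⟩
        · exact ⟨("vomiting", 3), by decide, hx⟩
        · exact ⟨("severe pain", 3), by decide, hx⟩
        · exact ⟨("infection", 3), by decide, hx⟩
    rw [hf4, pvFoldl_max3 _ _ 1 (by norm_num), hH]
    cases hhi : (["fever", "vomiting", "severe pain", "infection"] : List String).any
        (fun keyword => PySem.Str.isIn keyword (PySem.Str.lower symptoms)) <;>
      cases hage : pyAgeBoost patient_age <;> norm_num
  · -- an emergency keyword occurs: both sides are 4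
    have hk : PySem.Str.isIn k (PySem.Str.lower symptoms) = true := by
      have h := List.find?_some hfind
      simpa using h
    have hmem := List.mem_of_find?_eq_some hfind
    have h4 : (pvFL s).any (fun x => pvMatch s x && (x.2.2 == 4)) = true := by
      refine hE4.mpr ⟨k, hmem, ?_⟩
      simp only [PySem.Str.isIn_eq, ← hs] at hk
      exact hk
    rw [h4]
    cases hage : pyAgeBoost patient_age <;> norm_num
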